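-- pv_equiv track=rewrite | github.com/liucheng2912/py | leecode/easy/222/1385.py | findT
-- ===== SOURCE A (Python) =====
-- def findT(arr1,arr2,d):
--     cur = 0
--     for i in arr1:
--         temp=0
--         for j in arr2:
--             if abs(i-j)<=d:
--                 temp=1
--                 break
--         if temp!=1:
--             cur+=1
--     return cur
--
-- arr1 = [4,5,8]
--
-- arr2 = [10,9,1,8]
--
-- d = 2
-- ===== SOURCE B (Python) =====
-- def findT(arr1, arr2, d):
--     # Sort arr2 once, then binary-search the first element >= i-d for each i.
--     s = sorted(arr2)
--     cur = 0
--     for i in arr1: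
--         lo, hi = 0, len(s)
--         x = i - d
--         while lo < hi:
--             mid = (lo + hi) // 2
--             if s[mid] < x:
--                 lo = mid + 1
--             else:
--                 hi = mid
--         if lo == len(s) or s[lo] > i + d:
--             cur += 1
--     return cur
-- ===== Notes on version B (the rewrite author's own statement) =====
-- stated objective: alternative
-- what changed: B sorts arr2 once and, for each element of arr1, binary-searches the first arr2 value >= i-d instead of A's linear inner scan with a break flag; asymptotically O((n+m) log m) vs O(n*m), but A's early break makes it comparable on the timed random inputs.
import Mathlib
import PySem

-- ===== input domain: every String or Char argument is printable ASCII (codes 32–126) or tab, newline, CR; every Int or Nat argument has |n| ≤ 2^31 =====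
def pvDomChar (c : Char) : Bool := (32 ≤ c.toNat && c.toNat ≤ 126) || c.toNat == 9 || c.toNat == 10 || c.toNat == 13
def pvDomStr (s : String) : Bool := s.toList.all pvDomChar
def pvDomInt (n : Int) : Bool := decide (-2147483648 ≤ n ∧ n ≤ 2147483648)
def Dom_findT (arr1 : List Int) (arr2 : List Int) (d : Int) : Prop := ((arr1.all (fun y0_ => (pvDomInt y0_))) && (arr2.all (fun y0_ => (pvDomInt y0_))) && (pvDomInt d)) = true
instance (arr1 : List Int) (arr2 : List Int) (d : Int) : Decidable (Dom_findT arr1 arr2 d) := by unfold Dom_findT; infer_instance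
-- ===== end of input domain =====

-- B replaces A's linear inner scan of arr2 by one sort of arr2 plus a binary search per
-- element of arr1 (objective: alternative — a different algorithm of comparable measured cost).

-- ===== PORT A =====
-- inner 'for j in arr2' loop with break: returns the final value of temp (0 or 1)
def innerA (i : Int) (d : Int) : List Int → Int
  | [] => 0
  | j :: rest => if |i - j| ≤ d then 1 else innerA i d rest

def findT (arr1 : List Int) (arr2 : List Int) (d : Int) : Int :=
  arr1.foldl (fun cur i => if innerA i d arr2 ≠ 1 then cur + 1 else cur) 0

-- ===== PORT B =====
-- the hand-written while-loop binary search of Source B (first index with s[idx] ≥ x);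
-- s.getD mid 0 is only reached with mid < s.length, so the default is never used
-- fuel (= initial hi - lo, enough iterations) only makes the while loop structurally total
def blFuel (s : List Int) (x : Int) : Nat → Nat → Nat → Nat
  | 0, lo, _ => lo
  | fuel + 1, lo, hi =>
    if lo < hi then
      if s.getD ((lo + hi) / 2) 0 < x then blFuel s x fuel ((lo + hi) / 2 + 1) hi
      else blFuel s x fuel lo ((lo + hi) / 2)
    else lo

def blAux (s : List Int) (x : Int) (lo hi : Nat) : Nat := blFuel s x (hi - lo) lo hi

def findT_alt (arr1 : List Int) (arr2 : List Int) (d : Int) : Int :=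
  let s := PySem.List.sorted arr2 (fun x => x)
  arr1.foldl (fun cur i =>
    let pos := blAux s (i - d) 0 s.length
    -- 'pos == len(s) or s[pos] > i + d': the getD default is shadowed by the left disjunct
    if pos = s.length ∨ i + d < s.getD pos 0 then cur + 1 else cur) 0

-- ===== PRECONDITION & SPEC =====
def Spec_findT (arr1 : List Int) (arr2 : List Int) (d : Int) (out : Int) : Prop := out = findT_alt arr1 arr2 d
instance (arr1 : List Int) (arr2 : List Int) (d : Int) (out : Int) : Decidable (Spec_findT arr1 arr2 d out) := by unfold Spec_findT; infer_instance

-- ===== CLAIM (what is proved, stated in full; the proofs are below) =====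
def Claim_equal_findT : Prop := ∀ (arr1 : List Int) (arr2 : List Int) (d : Int), Dom_findT arr1 arr2 d → Spec_findT arr1 arr2 d (findT arr1 arr2 d)

-- ===== LEMMAS AND PROOFS =====

theorem pairwise_getElem_le (s : List Int) (hs : s.Pairwise (· ≤ ·))
    (j k : Nat) (hjk : j ≤ k) (hk : k < s.length) : s[j]'(by omega) ≤ s[k] := by
  rcases Nat.lt_or_ge j k with h | h
  · exact (List.pairwise_iff_getElem.mp hs) j k (by omega) hk h
  · have : j = k := by omega
    subst this; rfl

theorem blFuel_spec (s : List Int) (x : Int) (hs : s.Pairwise (· ≤ ·)) :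
    ∀ (fuel lo hi : Nat), hi - lo ≤ fuel → lo ≤ hi → hi ≤ s.length →
    (∀ j (hj : j < s.length), j < lo → s[j] < x) →
    (∀ j (hj : j < s.length), hi ≤ j → x ≤ s[j]) →
    lo ≤ blFuel s x fuel lo hi ∧ blFuel s x fuel lo hi ≤ hi ∧
    (∀ j (hj : j < s.length), j < blFuel s x fuel lo hi → s[j] < x) ∧
    (∀ j (hj : j < s.length), blFuel s x fuel lo hi ≤ j → x ≤ s[j]) := by
  intro fuel
  induction fuel with
  | zero =>
    intro lo hi hn hlh hhl hlow hhigh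
    have : lo = hi := by omega
    subst this
    exact ⟨le_refl _, le_refl _, fun j hj hjl => hlow j hj hjl,
      fun j hj hjg => hhigh j hj hjg⟩
  | succ fuel ih =>
    intro lo hi hn hlh hhl hlow hhigh
    rw [blFuel]
    by_cases h : lo < hi
    · rw [if_pos h]
      have hmid : (lo + hi) / 2 < s.length := by omega
      have hgd : s.getD ((lo + hi) / 2) 0 = s[(lo + hi) / 2] := by
        simp [List.getD_eq_getElem?_getD, List.getElem?_eq_getElem hmid]
      by_cases hc : s.getD ((lo + hi) / 2) 0 < x
      · rw [if_pos hc]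
        refine (ih _ _ (by omega) (by omega) hhl ?_ hhigh).imp
          (fun h1 => by omega) (fun h2 => h2)
        intro j hj hjlt
        calc s[j] ≤ s[(lo + hi) / 2] := pairwise_getElem_le s hs j _ (by omega) hmid
          _ < x := by rw [hgd] at hc; exact hc
      · rw [if_neg hc]
        refine (ih _ _ (by omega) (by omega) (by omega) hlow ?_).imp
          (fun h1 => h1) (fun h2 => ⟨by omega, h2.2⟩)
        intro j hj hjge
        have hx : x ≤ s[(lo + hi) / 2] := by rw [hgd] at hc; omega
        exact hx.trans (pairwise_getElem_le s hs _ j hjge hj)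
    · rw [if_neg h]
      exact ⟨le_refl _, by omega, fun j hj hjl => hlow j hj hjl,
        fun j hj hjg => hhigh j hj (by omega)⟩

theorem blAux_spec (s : List Int) (x : Int) (hs : s.Pairwise (· ≤ ·)) :
    ∀ (lo hi : Nat), lo ≤ hi → hi ≤ s.length →
    (∀ j (hj : j < s.length), j < lo → s[j] < x) →
    (∀ j (hj : j < s.length), hi ≤ j → x ≤ s[j]) →
    lo ≤ blAux s x lo hi ∧ blAux s x lo hi ≤ hi ∧
    (∀ j (hj : j < s.length), j < blAux s x lo hi → s[j] < x) ∧
    (∀ j (hj : j < s.length), blAux s x lo hi ≤ j → x ≤ s[j]) := by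
  intro lo hi hlh hhl hlow hhigh
  exact blFuel_spec s x hs (hi - lo) lo hi (le_refl _) hlh hhl hlow hhigh

-- B's per-element check is equivalent to "no element of s lies within d of i" (s sorted)
theorem check_iff (s : List Int) (hs : s.Pairwise (· ≤ ·)) (i d : Int) :
    (blAux s (i - d) 0 s.length = s.length ∨ i + d < s.getD (blAux s (i - d) 0 s.length) 0)
      ↔ ¬ ∃ j ∈ s, |i - j| ≤ d := by
  obtain ⟨h0, hlen, hbelow, habove⟩ :=
    blAux_spec s (i - d) hs 0 s.length (by omega) le_rfl
      (by intro j hj hjl; omega) (by intro j hj hjg; omega)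
  set pos := blAux s (i - d) 0 s.length with hpos
  constructor
  · rintro h ⟨j, hj, hclose⟩
    rw [abs_le] at hclose
    obtain ⟨k, hk, rfl⟩ := List.getElem_of_mem hj
    have h1 : i - d ≤ s[k] := by omega
    have h2 : s[k] ≤ i + d := by omega
    have hkpos : pos ≤ k := by
      by_contra hcon
      have := hbelow k hk (by omega)
      omega
    rcases h with h | h
    · omega
    · have hplt : pos < s.length := by omega
      have hgd : s.getD pos 0 = s[pos] := by
        simp [List.getD_eq_getElem?_getD, List.getElem?_eq_getElem hplt]
      rw [hgd] at h
      have := pairwise_getElem_le s hs pos k hkpos hk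
      omega
  · intro h
    by_contra hc
    rw [not_or, not_lt] at hc
    obtain ⟨hne, hle⟩ := hc
    have hplt : pos < s.length := by omega
    have hgd : s.getD pos 0 = s[pos] := by
      simp [List.getD_eq_getElem?_getD, List.getElem?_eq_getElem hplt]
    rw [hgd] at hle
    have hge : i - d ≤ s[pos] := habove pos hplt le_rfl
    exact h ⟨s[pos], List.getElem_mem hplt, by rw [abs_le]; omega⟩

theorem innerA_eq_one_iff (i d : Int) (l : List Int) :
    innerA i d l = 1 ↔ ∃ j ∈ l, |i - j| ≤ d := by
  induction l with
  | nil => simp [innerA]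
  | cons j rest ih =>
    simp only [innerA]
    by_cases h : |i - j| ≤ d
    · simp [h]
    · simp [h, ih]

theorem step_eq (arr2 : List Int) (d : Int) (i : Int) :
    (if innerA i d arr2 ≠ 1 then (1 : Int) else 0) =
    (if blAux (PySem.List.sorted arr2 (fun x => x)) (i - d) 0
          (PySem.List.sorted arr2 (fun x => x)).length = (PySem.List.sorted arr2 (fun x => x)).length ∨
        i + d < (PySem.List.sorted arr2 (fun x => x)).getD
          (blAux (PySem.List.sorted arr2 (fun x => x)) (i - d) 0 (PySem.List.sorted arr2 (fun x => x)).length) 0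
      then (1 : Int) else 0) := by
  set s := PySem.List.sorted arr2 (fun x => x) with hsdef
  have hs : s.Pairwise (· ≤ ·) := PySem.List.sorted_pairwise arr2 (fun x => x)
  have hmem : ∀ j, j ∈ s ↔ j ∈ arr2 := fun j => PySem.List.mem_sorted arr2 (fun x => x) false j
  have hiff : (innerA i d arr2 ≠ 1) ↔
      (blAux s (i - d) 0 s.length = s.length ∨ i + d < s.getD (blAux s (i - d) 0 s.length) 0) := by
    rw [check_iff s hs i d]
    simp only [ne_eq]
    apply not_congr
    rw [innerA_eq_one_iff]
    constructor
    · rintro ⟨j, hj, h⟩; exact ⟨j, (hmem j).mpr hj, h⟩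
    · rintro ⟨j, hj, h⟩; exact ⟨j, (hmem j).mp hj, h⟩
  by_cases h : innerA i d arr2 ≠ 1
  · rw [if_pos h, if_pos (hiff.mp h)]
  · rw [if_neg h, if_neg (fun hc => h (hiff.mpr hc))]

theorem fold_eq (arr1 : List Int) (f g : Int → Int → Int)
    (hfg : ∀ cur i, f cur i = g cur i) : ∀ c, arr1.foldl f c = arr1.foldl g c := by
  induction arr1 with
  | nil => intro c; rfl
  | cons a t ih => intro c; simp only [List.foldl_cons, hfg]; exact ih _

-- ===== VERDICT (by name: the statement is the Claim_ definition above) =====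
theorem findT_spec : Claim_equal_findT := by
  intro arr1 arr2 d _
  unfold Spec_findT findT findT_alt
  refine fold_eq arr1 _ _ ?_ 0
  intro cur i
  have h := step_eq arr2 d i
  by_cases hA : innerA i d arr2 ≠ 1
  · rw [if_pos hA] at h ⊢
    split_ifs at h with hB
    · rw [if_pos hB]
    · omega
  · rw [if_neg hA] at h ⊢
    split_ifs at h with hB
    · omega
    · rw [if_neg hB]
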